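-- pv_equiv track=rewrite | github.com/thepavangollapalli/whose-tweet | app.py | get_topic_list
-- ===== SOURCE A (Python) =====
-- def get_topic_list(tweet):
--   res = []
--   topics = [{"news", "fox", "fake", "interview", "bad"}, {"space", "car", "idea", "tech"}, {"america", "great", "korea"}]
--
--   for topic in topics:
--     present = 0
--     for word in tweet.split(" "):
--       if word.lower() in topic:
--         present = 1
--     res.append(present)
--   return res
-- ===== SOURCE B (Python) =====
-- def get_topic_list(tweet):
--   # inverted index: word -> index of the topic it belongs to (topics are disjoint)
--   topic_of = {"news": 0, "fox": 0, "fake": 0, "interview": 0, "bad": 0,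
--               "space": 1, "car": 1, "idea": 1, "tech": 1,
--               "america": 2, "great": 2, "korea": 2}
--   res = [0, 0, 0]
--   for word in tweet.split(" "):
--     i = topic_of.get(word.lower())
--     if i is not None:
--       res[i] = 1
--   return res
-- ===== Notes on version B (the rewrite author's own statement) =====
-- stated objective: alternative
-- what changed: Inverts the loop structure: instead of scanning every word once per topic, B builds a word-to-topic-index inverted dictionary and makes a single pass over the tweet's words, setting flags in a result array.
import Mathlib
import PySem

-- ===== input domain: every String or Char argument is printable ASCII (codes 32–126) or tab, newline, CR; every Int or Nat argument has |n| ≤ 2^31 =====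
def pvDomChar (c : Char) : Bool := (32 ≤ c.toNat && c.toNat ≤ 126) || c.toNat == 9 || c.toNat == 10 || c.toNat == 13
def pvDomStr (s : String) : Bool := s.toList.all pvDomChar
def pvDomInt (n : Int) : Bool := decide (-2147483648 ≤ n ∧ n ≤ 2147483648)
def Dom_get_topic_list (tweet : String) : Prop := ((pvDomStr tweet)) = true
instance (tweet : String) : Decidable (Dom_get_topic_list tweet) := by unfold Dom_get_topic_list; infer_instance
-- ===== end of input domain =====

-- B inverts the loop structure: a word→topic-index dictionary built once and a single pass over
-- the tweet's words setting flags, instead of A's per-topic rescan of all words (objective: alternative).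

-- tweet.split(" ") (exact: " " ≠ "", so PySem.Str.split? always returns some and the default is never used)
def pvSplitWords (tweet : String) : List String := (PySem.Str.split? tweet " ").getD []

-- ===== PORT A =====
-- the three Python topic-set literals of A
def pvTopics : List (PySem.Set String) :=
  [PySem.Set.ofList ["news", "fox", "fake", "interview", "bad"],
   PySem.Set.ofList ["space", "car", "idea", "tech"],
   PySem.Set.ofList ["america", "great", "korea"]]

def get_topic_list (tweet : String) : List Int :=
  pvTopics.foldl (fun res topic =>
    res ++ [(pvSplitWords tweet).foldl
              (fun present word => if PySem.Set.contains topic (PySem.Str.lower word) then 1 else present)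
              0]) []

-- ===== PORT B =====
-- B's inverted index: word → index of the (unique) topic containing it
def pvTopicOf : PySem.Dict String Int :=
  PySem.Dict.ofList
    [("news", 0), ("fox", 0), ("fake", 0), ("interview", 0), ("bad", 0),
     ("space", 1), ("car", 1), ("idea", 1), ("tech", 1),
     ("america", 2), ("great", 2), ("korea", 2)]

def get_topic_list_alt (tweet : String) : List Int :=
  (pvSplitWords tweet).foldl (fun res word =>
    match PySem.Dict.get? pvTopicOf (PySem.Str.lower word) with
    | some i => PySem.List.pySetD res i 1   -- res[i] = 1; i ∈ {0, 1, 2} is always in range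
    | none => res) [0, 0, 0]

-- ===== PRECONDITION & SPEC =====
def Spec_get_topic_list (tweet : String) (out : List Int) : Prop := out = get_topic_list_alt tweet
instance (tweet : String) (out : List Int) : Decidable (Spec_get_topic_list tweet out) := by unfold Spec_get_topic_list; infer_instance

-- ===== CLAIM (what is proved, stated in full; the proofs are below) =====
def Claim_equal_get_topic_list : Prop := ∀ (tweet : String), Dom_get_topic_list tweet → Spec_get_topic_list tweet (get_topic_list tweet)

-- ===== LEMMAS AND PROOFS =====

-- names for A's three topic sets, used only by the proofs
def pvT0 : PySem.Set String := PySem.Set.ofList ["news", "fox", "fake", "interview", "bad"]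
def pvT1 : PySem.Set String := PySem.Set.ofList ["space", "car", "idea", "tech"]
def pvT2 : PySem.Set String := PySem.Set.ofList ["america", "great", "korea"]

-- B's dictionary lookup, characterised by membership in A's three topic sets
theorem pv_lookup (s : String) :
    PySem.Dict.get? pvTopicOf s =
      if PySem.Set.contains pvT0 s then some 0
      else if PySem.Set.contains pvT1 s then some 1
      else if PySem.Set.contains pvT2 s then some 2 else none := by
  by_cases h1 : s = "news"; · subst h1; decide
  by_cases h2 : s = "fox"; · subst h2; decide
  by_cases h3 : s = "fake"; · subst h3; decide
  by_cases h4 : s = "interview"; · subst h4; decide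
  by_cases h5 : s = "bad"; · subst h5; decide
  by_cases h6 : s = "space"; · subst h6; decide
  by_cases h7 : s = "car"; · subst h7; decide
  by_cases h8 : s = "idea"; · subst h8; decide
  by_cases h9 : s = "tech"; · subst h9; decide
  by_cases h10 : s = "america"; · subst h10; decide
  by_cases h11 : s = "great"; · subst h11; decide
  by_cases h12 : s = "korea"; · subst h12; decide
  have e : pvTopicOf = PySem.Dict.mk
    [("news", 0), ("fox", 0), ("fake", 0), ("interview", 0), ("bad", 0),
     ("space", 1), ("car", 1), ("idea", 1), ("tech", 1),
     ("america", 2), ("great", 2), ("korea", 2)] := by decide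
  rw [e]
  simp only [PySem.Dict.get?_mk_cons, beq_iff_eq]
  rw [if_neg (fun h => h1 h.symm), if_neg (fun h => h2 h.symm), if_neg (fun h => h3 h.symm),
    if_neg (fun h => h4 h.symm), if_neg (fun h => h5 h.symm), if_neg (fun h => h6 h.symm),
    if_neg (fun h => h7 h.symm), if_neg (fun h => h8 h.symm), if_neg (fun h => h9 h.symm),
    if_neg (fun h => h10 h.symm), if_neg (fun h => h11 h.symm), if_neg (fun h => h12 h.symm)]
  simp [pvT0, pvT1, pvT2, PySem.Set.mem_ofList, PySem.Dict.get?,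
    h1, h2, h3, h4, h5, h6, h7, h8, h9, h10, h11, h12]

-- the three topic sets are pairwise disjoint (so B's index maps each word to at most one topic)
theorem pv_disj01 (s : String) (h : PySem.Set.contains pvT0 s = true) :
    PySem.Set.contains pvT1 s = false := by
  simp [pvT0, pvT1, PySem.Set.mem_ofList] at *
  rcases h with h|h|h|h|h <;> subst h <;> decide

theorem pv_disj02 (s : String) (h : PySem.Set.contains pvT0 s = true) :
    PySem.Set.contains pvT2 s = false := by
  simp [pvT0, pvT2, PySem.Set.mem_ofList] at *
  rcases h with h|h|h|h|h <;> subst h <;> decide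

theorem pv_disj12 (s : String) (h : PySem.Set.contains pvT1 s = true) :
    PySem.Set.contains pvT2 s = false := by
  simp [pvT1, pvT2, PySem.Set.mem_ofList] at *
  rcases h with h|h|h|h <;> subst h <;> decide

-- A's inner loop sets present to 1 on any hit: it equals "any hit" applied to the start value
theorem pv_foldl_present (t : PySem.Set String) (ws : List String) (p : Int) :
    ws.foldl (fun present word => if PySem.Set.contains t (PySem.Str.lower word) then 1 else present) p
      = if ws.any (fun w => PySem.Set.contains t (PySem.Str.lower w)) then 1 else p := by
  induction ws generalizing p with
  | nil => simp
  | cons w ws ih =>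
    simp only [List.foldl_cons, List.any_cons, ih]
    by_cases h1 : PySem.Str.lower w ∈ t <;>
      by_cases h2 : ∃ x ∈ ws, PySem.Str.lower x ∈ t <;>
        simp [h1, h2]

-- B's single pass over the words computes the three "any hit" flags
theorem pv_fold_alt (ws : List String) (a b c : Int) :
    ws.foldl (fun res word =>
      match PySem.Dict.get? pvTopicOf (PySem.Str.lower word) with
      | some i => PySem.List.pySetD res i 1
      | none => res) [a, b, c]
      = [if ws.any (fun w => PySem.Set.contains pvT0 (PySem.Str.lower w)) then 1 else a,
         if ws.any (fun w => PySem.Set.contains pvT1 (PySem.Str.lower w)) then 1 else b,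
         if ws.any (fun w => PySem.Set.contains pvT2 (PySem.Str.lower w)) then 1 else c] := by
  induction ws generalizing a b c with
  | nil => simp
  | cons w ws ih =>
    rw [List.foldl_cons, pv_lookup]
    by_cases m0 : PySem.Set.contains pvT0 (PySem.Str.lower w) = true
    · have M0 := (PySem.Set.contains_iff _ _).mp m0
      have N1 : PySem.Str.lower w ∉ pvT1 := fun h => by
        have hc := pv_disj01 _ m0
        simp at hc
        exact hc h
      have N2 : PySem.Str.lower w ∉ pvT2 := fun h => by
        have hc := pv_disj02 _ m0
        simp at hc
        exact hc h
      simp [M0, N1, N2, PySem.List.pySetD_of_nonneg, ih]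
    · have M0 : PySem.Str.lower w ∉ pvT0 := fun h => m0 ((PySem.Set.contains_iff _ _).mpr h)
      by_cases m1 : PySem.Set.contains pvT1 (PySem.Str.lower w) = true
      · have M1 := (PySem.Set.contains_iff _ _).mp m1
        have N2 : PySem.Str.lower w ∉ pvT2 := fun h => by
          have hc := pv_disj12 _ m1
          simp at hc
          exact hc h
        simp [M0, M1, N2, PySem.List.pySetD_of_nonneg, ih]
      · have M1 : PySem.Str.lower w ∉ pvT1 := fun h => m1 ((PySem.Set.contains_iff _ _).mpr h)
        by_cases m2 : PySem.Set.contains pvT2 (PySem.Str.lower w) = true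
        · have M2 := (PySem.Set.contains_iff _ _).mp m2
          simp [M0, M1, M2, PySem.List.pySetD_of_nonneg, ih]
        · have M2 : PySem.Str.lower w ∉ pvT2 := fun h => m2 ((PySem.Set.contains_iff _ _).mpr h)
          simp [M0, M1, M2, ih]

-- ===== VERDICT (by name: the statement is the Claim_ definition above) =====
theorem get_topic_list_spec : Claim_equal_get_topic_list := by
  intro tweet _
  unfold Spec_get_topic_list get_topic_list get_topic_list_alt pvTopics
  rw [pv_fold_alt]
  simp only [List.foldl_cons, List.foldl_nil, List.nil_append, List.singleton_append,
    pv_foldl_present]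
  rfl
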